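-- pv_equiv track=rewrite | github.com/Serendipity0429/User-Trajectory-Retriever | Platform/benchmark/pipeline_utils.py | parse_react_content
-- ===== SOURCE A (Python) =====
-- def parse_react_content(content):
--     """
--     Parses a ReAct-style text content into blocks of Thought, Action, Observation.
--     """
--     if not isinstance(content, str):
--         return [{"type": "text", "content": content}]
--
--     blocks = []
--     current_type = "text"
--     current_lines = []
--
--     lines = content.split('\n')
--     for line in lines:
--         stripped = line.strip()
--         if stripped.startswith("Thought:") or stripped.startswith("Reasoning:"):
--             if current_lines:
--                 blocks.append({"type": current_type, "content": "\n".join(current_lines).strip()})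
--             current_type = "thought"
--             current_lines = [stripped.split(":", 1)[1].strip() if ":" in stripped else stripped]
--         elif stripped.startswith("Action:") or stripped.startswith("Tool Call:"):
--             if current_lines:
--                 blocks.append({"type": current_type, "content": "\n".join(current_lines).strip()})
--             current_type = "action"
--             current_lines = [stripped.split(":", 1)[1].strip() if ":" in stripped else stripped]
--         elif stripped.startswith("Observation:") or stripped.startswith("Execution Result:"):
--             if current_lines:
--                 blocks.append({"type": current_type, "content": "\n".join(current_lines).strip()})
--             current_type = "observation"
--             current_lines = [stripped.split(":", 1)[1].strip() if ":" in stripped else stripped]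
--         else:
--             current_lines.append(line)
--
--     if current_lines:
--         blocks.append({"type": current_type, "content": "\n".join(current_lines).strip()})
--
--     # Filter out empty blocks
--     return [b for b in blocks if b['content']]
-- ===== SOURCE B (Python) =====
-- _HEADERS = [("Thought:", "thought"), ("Reasoning:", "thought"),
--             ("Action:", "action"), ("Tool Call:", "action"),
--             ("Observation:", "observation"), ("Execution Result:", "observation")]
--
--
-- def _classify(line):
--     """Return (block_type, text after the header's colon) if the stripped line
--     starts with a known header, else None."""
--     s = line.strip()
--     for pre, typ in _HEADERS:
--         if s.startswith(pre):
--             return (typ, s.split(":", 1)[1].strip())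
--     return None
--
--
-- def parse_react_content(content):
--     """
--     Parses a ReAct-style text content into blocks of Thought, Action, Observation.
--     """
--     if not isinstance(content, str):
--         return [{"type": "text", "content": content}]
--     # Scan the lines back-to-front: each header closes the block formed by the
--     # raw lines pending below it; whatever is still pending at the top is text.
--     blocks = []
--     pending = []
--     for line in reversed(content.split('\n')):
--         h = _classify(line)
--         if h is None:
--             pending = [line] + pending
--         else:
--             typ, head = h
--             blocks = [(typ, "\n".join([head] + pending).strip())] + blocks
--             pending = []
--     if pending:
--         blocks = [("text", "\n".join(pending).strip())] + blocks
--     return [{"type": t, "content": c} for t, c in blocks if c]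
-- ===== Notes on version B (the rewrite author's own statement) =====
-- stated objective: alternative
-- what changed: Replaces A's forward state machine (mutable current_type/current_lines carried across the loop with flushes at each header and at the end) by a single backward scan: each line is classified once against a header table, a header closes the block of pending raw lines below it, and the leftover pending lines at the top form the text block.
import Mathlib
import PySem

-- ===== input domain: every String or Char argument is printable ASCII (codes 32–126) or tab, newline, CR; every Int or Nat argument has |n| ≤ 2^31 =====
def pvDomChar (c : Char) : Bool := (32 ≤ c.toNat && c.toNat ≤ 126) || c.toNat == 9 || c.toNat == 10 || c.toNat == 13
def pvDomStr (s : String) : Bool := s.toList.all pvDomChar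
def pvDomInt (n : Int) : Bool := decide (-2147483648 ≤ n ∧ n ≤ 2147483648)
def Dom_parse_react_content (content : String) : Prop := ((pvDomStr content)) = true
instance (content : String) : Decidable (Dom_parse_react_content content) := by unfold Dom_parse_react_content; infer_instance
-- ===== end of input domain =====

-- B scans the lines back-to-front (a foldr): each header closes the block of pending raw
-- lines below it, instead of A's forward accumulator state machine; objective: alternative.


-- ===== PORT A =====
-- A's loop body, named so the proofs can talk about it; state = (blocks, current_type, current_lines).
-- The dict {"type": t, "content": c} is carried as the pair (t, c) and rendered to the
-- association list [("type", t), ("content", c)] at return — exact for these two-key literals.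
-- 'stripped.split(":", 1)[1]' is ported with a total [1]-lookup (getD 1 ""); under the
-- guard '":" in stripped' the split always has a second part, so this is exact.
def pvStepA (st : List (String × String) × String × List String) (line : String) :
    List (String × String) × String × List String :=
  let blocks := st.1
  let current_type := st.2.1
  let current_lines := st.2.2
  let stripped := PySem.Str.strip line
  let after := if PySem.Str.isIn ":" stripped then
      PySem.Str.strip (((PySem.Str.splitMax? stripped ":" 1).getD []).getD 1 "")
    else stripped
  if PySem.Str.startswith stripped "Thought:" || PySem.Str.startswith stripped "Reasoning:" then
    ((if current_lines ≠ [] then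
        blocks ++ [(current_type, PySem.Str.strip (PySem.Str.join "\n" current_lines))]
      else blocks), "thought", [after])
  else if PySem.Str.startswith stripped "Action:" || PySem.Str.startswith stripped "Tool Call:" then
    ((if current_lines ≠ [] then
        blocks ++ [(current_type, PySem.Str.strip (PySem.Str.join "\n" current_lines))]
      else blocks), "action", [after])
  else if PySem.Str.startswith stripped "Observation:" || PySem.Str.startswith stripped "Execution Result:" then
    ((if current_lines ≠ [] then
        blocks ++ [(current_type, PySem.Str.strip (PySem.Str.join "\n" current_lines))]
      else blocks), "observation", [after])
  else
    (blocks, current_type, current_lines ++ [line])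

def parse_react_content (content : String) : List (List (String × String)) :=
  let lines := (PySem.Str.split? content "\n").getD []  -- split? is none only for sep=""; sep is "\n", so exact
  let st := lines.foldl pvStepA ([], "text", [])
  let blocks := if st.2.2 ≠ [] then
      st.1 ++ [(st.2.1, PySem.Str.strip (PySem.Str.join "\n" st.2.2))]
    else st.1
  (blocks.filter (fun b => b.2 ≠ "")).map (fun b => [("type", b.1), ("content", b.2)])

-- ===== PORT B =====
-- Source B's _classify: the loop over _HEADERS is unrolled over the six literal headers.
def pvClassify (line : String) : Option (String × String) :=
  let s := PySem.Str.strip line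
  let after := PySem.Str.strip (((PySem.Str.splitMax? s ":" 1).getD []).getD 1 "")
  if PySem.Str.startswith s "Thought:" then some ("thought", after)
  else if PySem.Str.startswith s "Reasoning:" then some ("thought", after)
  else if PySem.Str.startswith s "Action:" then some ("action", after)
  else if PySem.Str.startswith s "Tool Call:" then some ("action", after)
  else if PySem.Str.startswith s "Observation:" then some ("observation", after)
  else if PySem.Str.startswith s "Execution Result:" then some ("observation", after)
  else none

-- Source B's loop 'for line in reversed(lines)' with prepends is exactly this foldr step;
-- state = (blocks, pending).
def pvStepB (line : String) (st : List (String × String) × List String) :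
    List (String × String) × List String :=
  match pvClassify line with
  | none => (st.1, line :: st.2)
  | some (typ, head) =>
      ((typ, PySem.Str.strip (PySem.Str.join "\n" (head :: st.2))) :: st.1, [])

def parse_react_content_alt (content : String) : List (List (String × String)) :=
  let lines := (PySem.Str.split? content "\n").getD []  -- split? is none only for sep=""; sep is "\n", so exact
  let st := lines.foldr pvStepB ([], [])
  let blocks := if st.2 ≠ [] then
      ("text", PySem.Str.strip (PySem.Str.join "\n" st.2)) :: st.1
    else st.1
  (blocks.filter (fun b => b.2 ≠ "")).map (fun b => [("type", b.1), ("content", b.2)])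

-- ===== PRECONDITION & SPEC =====
def Spec_parse_react_content (content : String) (out : List (List (String × String))) : Prop := out = parse_react_content_alt content
instance (content : String) (out : List (List (String × String))) : Decidable (Spec_parse_react_content content out) := by unfold Spec_parse_react_content; infer_instance

-- ===== CLAIM (what is proved, stated in full; the proofs are below) =====
def Claim_equal_parse_react_content : Prop := ∀ (content : String), Dom_parse_react_content content → Spec_parse_react_content content (parse_react_content content)

-- ===== LEMMAS AND PROOFS =====

-- a line whose strip starts with one of the headers contains a colon
theorem pv_colon_of_startswith (s p : String) (hp : (":").toList <:+: p.toList)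
    (h : PySem.Str.startswith s p = true) : PySem.Str.isIn ":" s = true := by
  rw [PySem.Str.isIn_iff_infix]
  have h2 : p.toList <+: s.toList := by
    have := (PySem.Chars.startswith_iff s.toList p.toList).mp (by simpa using h)
    exact this
  exact hp.trans h2.isInfix

theorem pvStepA_none (line : String) (h : pvClassify line = none) (st) :
    pvStepA st line = (st.1, st.2.1, st.2.2 ++ [line]) := by
  unfold pvClassify at h
  simp only at h
  split_ifs at h with h1 h2 h3 h4 h5 h6 <;>
    simp_all [pvStepA]

theorem pvStepA_some (line : String) (t hd : String) (h : pvClassify line = some (t, hd)) (st) :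
    pvStepA st line =
      ((if st.2.2 ≠ [] then
          st.1 ++ [(st.2.1, PySem.Str.strip (PySem.Str.join "\n" st.2.2))]
        else st.1), t, [hd]) := by
  have key : ∀ (p : String), PySem.Str.startswith (PySem.Str.strip line) p = true →
      (":").toList <:+: p.toList → PySem.Str.isIn ":" (PySem.Str.strip line) = true :=
    fun p hs hp => pv_colon_of_startswith _ p hp hs
  unfold pvClassify at h
  simp only at h
  unfold pvStepA
  split_ifs at h with h1 h2 h3 h4 h5 h6 <;>
    simp only [Option.some.injEq, Prod.mk.injEq] at h
  · obtain ⟨rfl, rfl⟩ := h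
    have k := key _ h1 (by decide)
    rw [if_pos (by rw [h1]; rfl), if_pos k]
  · obtain ⟨rfl, rfl⟩ := h
    have k := key _ h2 (by decide)
    rw [if_pos (by rw [h2, Bool.or_true]), if_pos k]
  · obtain ⟨rfl, rfl⟩ := h
    have k := key _ h3 (by decide)
    rw [if_neg (by simp only [Bool.or_eq_true]; exact fun hc => hc.elim h1 h2),
      if_pos (by rw [h3]; rfl), if_pos k]
  · obtain ⟨rfl, rfl⟩ := h
    have k := key _ h4 (by decide)
    rw [if_neg (by simp only [Bool.or_eq_true]; exact fun hc => hc.elim h1 h2),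
      if_pos (by rw [h4, Bool.or_true]), if_pos k]
  · obtain ⟨rfl, rfl⟩ := h
    have k := key _ h5 (by decide)
    rw [if_neg (by simp only [Bool.or_eq_true]; exact fun hc => hc.elim h1 h2),
      if_neg (by simp only [Bool.or_eq_true]; exact fun hc => hc.elim h3 h4),
      if_pos (by rw [h5]; rfl), if_pos k]
  · obtain ⟨rfl, rfl⟩ := h
    have k := key _ h6 (by decide)
    rw [if_neg (by simp only [Bool.or_eq_true]; exact fun hc => hc.elim h1 h2),
      if_neg (by simp only [Bool.or_eq_true]; exact fun hc => hc.elim h3 h4),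
      if_pos (by rw [h6, Bool.or_true]), if_pos k]

-- the central invariant: A's forward fold, finalized, equals B's backward fold
theorem pv_fold_eq (lines : List String) :
    ∀ (blocks : List (String × String)) (t : String) (cur : List String),
      (let st := lines.foldl pvStepA (blocks, t, cur)
       if st.2.2 ≠ [] then
         st.1 ++ [(st.2.1, PySem.Str.strip (PySem.Str.join "\n" st.2.2))]
       else st.1)
      = blocks ++
        (let sb := lines.foldr pvStepB ([], [])
         (if cur ++ sb.2 ≠ [] then
            [(t, PySem.Str.strip (PySem.Str.join "\n" (cur ++ sb.2)))]
          else []) ++ sb.1) := by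
  induction lines with
  | nil =>
    intro blocks t cur
    by_cases hc : cur = [] <;> simp [hc]
  | cons line lines ih =>
    intro blocks t cur
    cases hc : pvClassify line with
    | none =>
      simp only [List.foldl_cons, List.foldr_cons, pvStepA_none line hc, pvStepB, hc]
      rw [ih]
      simp
    | some th =>
      obtain ⟨ty, hd⟩ := th
      simp only [List.foldl_cons, List.foldr_cons, pvStepA_some line ty hd hc, pvStepB, hc]
      rw [ih]
      cases hcur : cur with
      | nil => simp
      | cons c cs => simp

-- ===== VERDICT (by name: the statement is the Claim_ definition above) =====
theorem parse_react_content_spec : Claim_equal_parse_react_content := by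
  intro content _
  unfold Spec_parse_react_content parse_react_content parse_react_content_alt
  have h := pv_fold_eq ((PySem.Str.split? content "\n").getD []) [] "text" []
  simp only [List.nil_append] at h
  simp only [h]
  cases hsb : (((PySem.Str.split? content "\n").getD []).foldr pvStepB ([], [])).2 <;> simp [hsb]
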